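-- pv_equiv track=rewrite | github.com/MrBrantCode/unitest_baseline | mut_generate/mist_train_cf/cf_51814/solution.py | create_index_dict
-- ===== SOURCE A (Python) =====
-- def create_index_dict(input_list):
--     """
--     Creates a dictionary where keys are elements from the input list and values are lists of their corresponding indices.
--
--     Args:
--         input_list (list): A list of elements.
--
--     Returns:
--         dict: A dictionary with elements as keys and lists of indices as values.
--     """
--     index_dict = {}
--     for i, element in enumerate(input_list):
--         if element in index_dict:
--             index_dict[element].append(i)
--         else:
--             index_dict[element] = [i]
--     return index_dict
-- ===== SOURCE B (Python) =====
-- def create_index_dict(input_list):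
--     distinct = list(dict.fromkeys(input_list))
--     return {el: [i for i, x in enumerate(input_list) if x == el] for el in distinct}
-- ===== Notes on version B (the rewrite author's own statement) =====
-- stated objective: idiomatic
-- what changed: B first collects the distinct keys in first-occurrence order with dict.fromkeys and then builds each index list by a per-key scan of enumerate(input_list), instead of A's single pass that mutates a growing dict with an append-or-insert branch per element.
import Mathlib
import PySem

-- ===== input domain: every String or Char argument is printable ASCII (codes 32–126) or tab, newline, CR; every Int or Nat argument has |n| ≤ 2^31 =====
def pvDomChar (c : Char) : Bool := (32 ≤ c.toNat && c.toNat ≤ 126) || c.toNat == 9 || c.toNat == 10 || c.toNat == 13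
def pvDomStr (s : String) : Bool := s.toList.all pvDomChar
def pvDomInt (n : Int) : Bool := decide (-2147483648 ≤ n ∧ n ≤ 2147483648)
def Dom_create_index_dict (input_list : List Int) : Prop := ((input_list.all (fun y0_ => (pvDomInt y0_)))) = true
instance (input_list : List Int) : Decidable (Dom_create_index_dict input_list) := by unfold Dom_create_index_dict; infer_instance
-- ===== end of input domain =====

-- B replaces A's single mutating pass (append-or-insert per element) by an ordered dedup of the keys plus a per-key scan, as an idiomatic dict comprehension; same result.

-- ===== PORT A =====
def create_index_dict (input_list : List Int) : List (Int × List Int) :=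
  ((PySem.List.enumerate input_list 0).foldl
    (fun d p =>
      if d.contains p.2 then d.modify p.2 [] (fun v => v ++ [p.1])
      else d.insert p.2 [p.1])
    PySem.Dict.empty).items

-- ===== PORT B =====
def create_index_dict_alt (input_list : List Int) : List (Int × List Int) :=
  (PySem.List.dedup input_list).map
    (fun el => (el, ((PySem.List.enumerate input_list 0).filter (fun p => p.2 == el)).map (·.1)))

-- ===== PRECONDITION & SPEC =====
def Spec_create_index_dict (input_list : List Int) (out : List (Int × List Int)) : Prop := out = create_index_dict_alt input_list
instance (input_list : List Int) (out : List (Int × List Int)) : Decidable (Spec_create_index_dict input_list out) := by unfold Spec_create_index_dict; infer_instance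

-- ===== CLAIM =====
def Claim_equal_create_index_dict : Prop := ∀ (input_list : List Int), Dom_create_index_dict input_list → Spec_create_index_dict input_list (create_index_dict input_list)

-- ===== LEMMAS AND PROOFS =====

-- A's branch is exactly Python's d[x] = d.get(x, []) + [i] in both arms.
theorem stepA_eq_modify (d : PySem.Dict Int (List Int)) (i x : Int) :
    (if d.contains x then d.modify x [] (fun v => v ++ [i]) else d.insert x [i])
      = d.modify x [] (fun v => v ++ [i]) := by
  by_cases h : d.contains x = true
  · rw [if_pos h]
  · have h' : d.contains x = false := by simpa using h
    have h2 : d.get? x = none := by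
      rw [← Option.not_isSome_iff_eq_none, ← PySem.Dict.contains_eq_isSome_get?, h']; simp
    rw [if_neg h]
    simp [PySem.Dict.modify, PySem.Dict.insert, PySem.Dict.getD, h', h2]

theorem fold_modify_items (xs : List Int) :
    ((PySem.List.enumerate xs 0).foldl
      (fun d p => d.modify p.2 [] (fun v => v ++ [p.1])) PySem.Dict.empty).items
    = create_index_dict_alt xs := by
  unfold create_index_dict_alt
  set l := PySem.List.enumerate xs 0 with hl
  have hfold : l.foldl (fun d p => d.modify p.2 [] (fun v => v ++ [p.1])) PySem.Dict.empty
      = (l.map Prod.swap).foldl (fun d p => d.modify p.1 [] (fun v => v ++ [p.2])) PySem.Dict.empty := by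
    rw [List.foldl_map]; simp only [Prod.fst_swap, Prod.snd_swap]
  rw [hfold]
  set F := (l.map Prod.swap).foldl (fun d p => d.modify p.1 [] (fun v => v ++ [p.2])) PySem.Dict.empty with hF
  have hkey : F.keys = PySem.Set.ofList xs := by
    rw [hF, PySem.Dict.keys_foldl_modify_key (l.map Prod.swap) (fun p => (p.1 : Int))
      ([] : List Int) (fun d p => fun v => v ++ [p.2]) PySem.Dict.empty]
    simp [List.map_map, hl, Function.comp_def, PySem.List.map_snd_enumerate,
      PySem.Set.update_nil_left]
  have hnd : F.keys.Nodup := by rw [hkey]; exact PySem.Set.nodup_ofList xs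
  have hget : ∀ k, F.getD k [] = (l.filter (fun p => p.2 == k)).map (·.1) := by
    intro k
    rw [hF, PySem.Dict.getD_foldl_modify_append]
    simp [List.filter_map, List.map_map, Function.comp_def, Prod.swap]
  rw [PySem.Dict.items_eq_map_keys F hnd [], hkey]
  simp only [PySem.List.dedup_eq_ofList]
  exact List.map_congr_left (fun k _ => by rw [hget k])

theorem create_index_dict_eq_alt (xs : List Int) :
    create_index_dict xs = create_index_dict_alt xs := by
  unfold create_index_dict
  have hstep : (fun (d : PySem.Dict Int (List Int)) (p : Int × Int) =>
      if d.contains p.2 then d.modify p.2 [] (fun v => v ++ [p.1]) else d.insert p.2 [p.1])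
      = (fun d p => d.modify p.2 [] (fun v => v ++ [p.1])) := by
    funext d p; exact stepA_eq_modify d p.1 p.2
  rw [hstep]
  exact fold_modify_items xs

-- ===== VERDICT =====
theorem create_index_dict_spec : Claim_equal_create_index_dict := by
  intro xs _
  exact create_index_dict_eq_alt xs
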